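-- pv_equiv track=rewrite | github.com/mukeshkumar99422/python | series_sum.py | sum4
-- ===== SOURCE A (Python) =====
-- def sum4(n):
--     s=0
--     i=1
--     while i<=n:
--         if(s%2==0):
--             s=s+i
--         else:
--             s=s-i
--         i=i+2
--     return s
-- ===== SOURCE B (Python) =====
-- def sum4(n):
--     if n < 1:
--         return 0
--     m = (n + 1) // 2
--     return m if m % 2 == 1 else -m
-- ===== Notes on version B (the rewrite author's own statement) =====
-- stated objective: faster
-- what changed: Replaces the O(n) alternating while-loop over odd numbers with the closed form m=(n+1)//2, returning m if m is odd else -m (0 for n<1).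
import Mathlib
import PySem

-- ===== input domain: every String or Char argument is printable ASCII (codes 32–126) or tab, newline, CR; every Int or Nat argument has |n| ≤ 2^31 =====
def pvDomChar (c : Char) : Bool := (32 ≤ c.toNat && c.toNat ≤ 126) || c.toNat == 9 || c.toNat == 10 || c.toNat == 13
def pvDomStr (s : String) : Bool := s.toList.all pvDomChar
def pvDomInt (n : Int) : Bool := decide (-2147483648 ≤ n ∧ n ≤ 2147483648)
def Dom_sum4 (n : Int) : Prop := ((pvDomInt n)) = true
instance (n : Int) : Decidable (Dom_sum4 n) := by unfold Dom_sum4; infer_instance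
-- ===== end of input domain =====

-- B replaces A's O(n) alternating while-loop over odd numbers with the O(1) closed form
-- m = (n+1)//2, returning m if m is odd else -m (0 for n < 1).

-- ===== PORT A =====
-- the while-loop of A: state (s, i), step i := i+2, stop when i > n
def sum4Loop (n s i : Int) : Int :=
  if _h : i ≤ n then
    sum4Loop n (if PySem.Int.mod s 2 = 0 then s + i else s - i) (i + 2)
  else s
termination_by (n + 1 - i).toNat
decreasing_by omega

def sum4 (n : Int) : Int := sum4Loop n 0 1

-- ===== PORT B =====
def sum4_alt (n : Int) : Int :=
  if n < 1 then 0
  else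
    let m := PySem.Int.floordiv (n + 1) 2
    if PySem.Int.mod m 2 = 1 then m else -m

-- ===== PRECONDITION & SPEC =====
def Spec_sum4 (n : Int) (out : Int) : Prop := out = sum4_alt n
instance (n : Int) (out : Int) : Decidable (Spec_sum4 n out) := by unfold Spec_sum4; infer_instance

-- ===== CLAIM (what is proved, stated in full; the proofs are below) =====
def Claim_equal_sum4 : Prop := ∀ (n : Int), Dom_sum4 n → Spec_sum4 n (sum4 n)

-- ===== LEMMAS AND PROOFS =====

-- value of A's accumulator after k iterations
def sum4Val (k : Nat) : Int := if k % 2 = 1 then (k : Int) else -(k : Int)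

lemma sum4Loop_invariant (n : Int) (d k : Nat)
    (hM : ((n + 1) / 2).toNat = k + d) (hk : (2 * k + 1 : Int) ≤ n ∨ d = 0) :
    sum4Loop n (sum4Val k) (2 * (k : Int) + 1) = sum4Val ((n + 1) / 2).toNat := by
  induction d generalizing k with
  | zero =>
    rw [sum4Loop]
    have hstop : ¬ (2 * (k : Int) + 1 ≤ n) := by omega
    simp [hstop, hM]
  | succ d ih =>
    have hle : (2 * (k : Int) + 1) ≤ n := by omega
    rw [sum4Loop]
    simp only [hle, dif_pos]
    have h2 : PySem.Int.mod (sum4Val k) 2 = (sum4Val k) % 2 :=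
      PySem.Int.mod_eq_emod_of_pos (by omega)
    have hstep : (if PySem.Int.mod (sum4Val k) 2 = 0 then sum4Val k + (2 * (k : Int) + 1)
        else sum4Val k - (2 * (k : Int) + 1)) = sum4Val (k + 1) := by
      rw [h2]
      unfold sum4Val
      rcases Nat.even_or_odd k with he | ho
      · have hk2 : k % 2 = 0 := Nat.even_iff.mp he
        have hk12 : (k + 1) % 2 = 1 := by omega
        simp only [hk2, hk12]
        have : (-(k : Int)) % 2 = 0 := by omega
        simp [this]
        ring
      · have hk2 : k % 2 = 1 := Nat.odd_iff.mp ho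
        have hk12 : (k + 1) % 2 = 0 := by omega
        simp only [hk2, hk12]
        have : ((k : Int)) % 2 = 1 := by omega
        simp [this]
        ring
    rw [hstep]
    have harg : (2 * (k : Int) + 1) + 2 = 2 * ((k : Nat) + 1 : Nat) + 1 := by push_cast; ring
    rw [harg]
    exact ih (k + 1) (by omega) (by omega)

lemma sum4_eq_val (n : Int) : sum4 n = sum4Val ((n + 1) / 2).toNat := by
  have h0 : sum4Val 0 = 0 := by simp [sum4Val]
  have h1 : (2 * ((0 : Nat) : Int) + 1) = 1 := by norm_num
  have := sum4Loop_invariant n ((n + 1) / 2).toNat 0 (by omega)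
    (by rcases Nat.eq_zero_or_pos ((n + 1) / 2).toNat with h | h
        · right; exact h
        · left; omega)
  rw [sum4, ← h0, ← h1]
  exact this

theorem sum4_spec_aux (n : Int) : sum4 n = sum4_alt n := by
  rw [sum4_eq_val, sum4_alt]
  by_cases hn : n < 1
  · have hM : ((n + 1) / 2).toNat = 0 := by omega
    simp [hM, sum4Val, hn]
  · simp only [hn, if_false]
    have hfd : PySem.Int.floordiv (n + 1) 2 = (n + 1) / 2 :=
      PySem.Int.floordiv_eq_ediv_of_pos (by omega)
    have hmd : PySem.Int.mod ((n + 1) / 2) 2 = ((n + 1) / 2) % 2 :=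
      PySem.Int.mod_eq_emod_of_pos (by omega)
    simp only [hfd, hmd]
    have hpos : 0 < (n + 1) / 2 := by omega
    have hcast : (((n + 1) / 2).toNat : Int) = (n + 1) / 2 := by omega
    unfold sum4Val
    rcases Nat.even_or_odd ((n + 1) / 2).toNat with he | ho
    · have hk2 : ((n + 1) / 2).toNat % 2 = 0 := Nat.even_iff.mp he
      have : ((n + 1) / 2) % 2 = 0 := by omega
      simp [hk2, this, hcast]
    · have hk2 : ((n + 1) / 2).toNat % 2 = 1 := Nat.odd_iff.mp ho
      have : ((n + 1) / 2) % 2 = 1 := by omega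
      simp [hk2, this, hcast]

-- ===== VERDICT (by name: the statement is the Claim_ definition above) =====
theorem sum4_spec : Claim_equal_sum4 := by
  intro n _
  exact sum4_spec_aux n
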